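-- pv_equiv track=rewrite | github.com/paras-a/Data-Structures-and-Algorithms | recursion.py | prepend_to_list
-- ===== SOURCE A (Python) =====
-- def prepend_to_list(lst, n):
--     """
--     Create a list of numbers from n down to 1 using recursion.
--
--     @param lst: The list to prepend to (initially empty)
--     @param n: A positive integer
--     @return: List containing numbers from n to 1
--     @rtype: list
--
--     Examples:
--         >>> prepend_to_list([], 3)
--         [3, 2, 1]
--         >>> prepend_to_list([], 1)
--         [1]
--     """
--     if n <= 0:
--         raise ValueError("n must be a positive integer")
--     if n == 1:
--         lst.append(n)
--         return lst
--     lst.append(n)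
--     return prepend_to_list(lst, n-1)
-- ===== SOURCE B (Python) =====
-- def prepend_to_list(lst, n):
--     if n <= 0:
--         raise ValueError("n must be a positive integer")
--     for i in range(n, 0, -1):
--         lst.append(i)
--     return lst
-- ===== Notes on version B (the rewrite author's own statement) =====
-- stated objective: simpler
-- what changed: Replaces the recursion (one call per element) with a single iterative loop over range(n, 0, -1) appending each value; same in-place mutation and same returned list object.
import Mathlib
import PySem

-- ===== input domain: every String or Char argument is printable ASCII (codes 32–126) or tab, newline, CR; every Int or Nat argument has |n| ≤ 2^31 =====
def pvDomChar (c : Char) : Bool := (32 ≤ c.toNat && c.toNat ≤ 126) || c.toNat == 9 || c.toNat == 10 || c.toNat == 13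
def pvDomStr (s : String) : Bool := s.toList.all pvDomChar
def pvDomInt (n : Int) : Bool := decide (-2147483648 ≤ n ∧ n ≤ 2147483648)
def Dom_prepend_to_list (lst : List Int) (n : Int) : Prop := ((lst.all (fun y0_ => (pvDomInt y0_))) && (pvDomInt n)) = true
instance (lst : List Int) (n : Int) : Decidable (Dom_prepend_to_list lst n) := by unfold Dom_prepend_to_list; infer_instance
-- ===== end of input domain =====

-- B replaces the recursion (one call per element) with a single loop over range(n,0,-1);
-- return-value equivalence proved on n ≥ 1 (both versions raise ValueError on n ≤ 0).
-- Note: both A and B mutate lst in place; the theorems here are about the return value.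

-- ===== PORT A =====
def prepend_to_list (lst : List Int) (n : Int) : List Int :=
  if _h0 : n ≤ 0 then lst            -- Python raises ValueError here (outside Pre_)
  else if n = 1 then lst ++ [n]
  else prepend_to_list (lst ++ [n]) (n - 1)
termination_by n.toNat
decreasing_by omega

-- ===== PORT B =====
def prepend_to_list_alt (lst : List Int) (n : Int) : List Int :=
  if n ≤ 0 then lst                  -- Python raises ValueError here (outside Pre_)
  else (PySem.List.pyRange n 0 (-1)).foldl (fun acc i => acc ++ [i]) lst

-- ===== PRECONDITION & SPEC =====
-- Pre_ excludes exactly n ≤ 0, where the Python A raises ValueError.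
def Pre_prepend_to_list (lst : List Int) (n : Int) : Prop := 1 ≤ n
instance (lst : List Int) (n : Int) : Decidable (Pre_prepend_to_list lst n) := by unfold Pre_prepend_to_list; infer_instance
def pvWitness_prepend_to_list : List Int × Int := ([], 3)
def Spec_prepend_to_list (lst : List Int) (n : Int) (out : List Int) : Prop := out = prepend_to_list_alt lst n
instance (lst : List Int) (n : Int) (out : List Int) : Decidable (Spec_prepend_to_list lst n out) := by unfold Spec_prepend_to_list; infer_instance

-- ===== CLAIM (what is proved, stated in full; the proofs are below) =====
def Claim_equal_prepend_to_list : Prop := ∀ (lst : List Int) (n : Int), Dom_prepend_to_list lst n → Pre_prepend_to_list lst n → Spec_prepend_to_list lst n (prepend_to_list lst n)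

-- ===== LEMMAS AND PROOFS =====

theorem foldl_append_singleton (l : List Int) (init : List Int) :
    l.foldl (fun acc i => acc ++ [i]) init = init ++ l := by
  induction l generalizing init with
  | nil => simp
  | cons x xs ih => simp [List.foldl, ih]

theorem prepend_to_list_closed : ∀ (m : Nat) (n : Int) (lst : List Int), n.toNat = m → 1 ≤ n →
    prepend_to_list lst n = lst ++ PySem.List.pyRange n 0 (-1) := by
  intro m
  induction m using Nat.strong_induction_on with
  | _ m ih =>
    intro n lst hm h
    rw [prepend_to_list]
    rw [PySem.List.pyRange_neg_one_cons (by omega : (0:Int) < n)]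
    by_cases h1 : n = 1
    · subst h1
      simp [PySem.List.pyRange_neg_one_eq_nil]
    · simp only [dif_neg (by omega : ¬ n ≤ 0), if_neg h1]
      rw [ih (n-1).toNat (by omega) (n-1) _ rfl (by omega)]
      simp

theorem prepend_to_list_spec : Claim_equal_prepend_to_list := by
  intro lst n _hd hp
  unfold Pre_prepend_to_list at hp
  unfold Spec_prepend_to_list prepend_to_list_alt
  rw [if_neg (by omega : ¬ n ≤ 0), foldl_append_singleton,
    prepend_to_list_closed n.toNat n lst rfl hp]
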